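-- pv_equiv track=rewrite | github.com/womogenes/am115-final | solve_matrix.py | create_states
-- ===== SOURCE A (Python) =====
-- from collections import defaultdict
--
-- def create_states(adj):
--     """
--     Create list of states [(u1, v1), (u1, v2), ..., (un, vn)].
--     """
--     incoming = defaultdict(list)
--     for node in adj:
--         for edge in adj[node]:
--             incoming[edge[0]].append(node)
--     for node in incoming:
--         incoming[node].sort()
--
--     states = []
--     for node in sorted(adj.keys()):
--         states.extend([(node, prev) for prev in incoming[node]])
--
--     return states
-- ===== SOURCE B (Python) =====
-- def create_states(adj):
--     """
--     Create list of states [(u1, v1), (u1, v2), ..., (un, vn)].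
--     """
--     pairs = [(edge[0], node) for node in adj for edge in adj[node] if edge[0] in adj]
--     return sorted(pairs)
-- ===== Notes on version B (the rewrite author's own statement) =====
-- stated objective: simpler
-- what changed: Replaces the incoming-edge index (defaultdict of buckets, per-bucket sorts, then a scan over sorted keys) with one flat comprehension of (target, source) pairs filtered to targets present in adj, followed by a single lexicographic sort.
import Mathlib
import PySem

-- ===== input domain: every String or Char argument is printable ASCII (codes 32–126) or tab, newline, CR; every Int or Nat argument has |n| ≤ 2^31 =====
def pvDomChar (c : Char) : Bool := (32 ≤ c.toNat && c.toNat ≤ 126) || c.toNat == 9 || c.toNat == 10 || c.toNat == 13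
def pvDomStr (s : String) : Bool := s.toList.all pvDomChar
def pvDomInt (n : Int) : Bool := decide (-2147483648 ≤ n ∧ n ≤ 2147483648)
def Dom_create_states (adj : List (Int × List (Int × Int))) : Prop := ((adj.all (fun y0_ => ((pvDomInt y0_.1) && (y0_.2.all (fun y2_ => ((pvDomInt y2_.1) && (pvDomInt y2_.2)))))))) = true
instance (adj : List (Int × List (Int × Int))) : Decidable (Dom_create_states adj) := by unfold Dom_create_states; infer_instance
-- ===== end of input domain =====

-- B replaces A's incoming-edge index and per-bucket sorts by one flat (target, source) pair list and a single lexicographic sort (objective: simpler).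

-- ===== PORT A =====
def create_states (adj : List (Int × List (Int × Int))) : List (Int × Int) :=
  let d := PySem.Dict.ofList adj
  -- incoming = defaultdict(list); for node in adj: for edge in adj[node]: incoming[edge[0]].append(node)
  let incoming : PySem.Dict Int (List Int) :=
    d.items.foldl (fun inc p =>
      p.2.foldl (fun inc2 e => inc2.modify e.1 [] (fun l => l ++ [p.1])) inc) PySem.Dict.empty
  -- for node in incoming: incoming[node].sort()
  let incoming2 :=
    incoming.keys.foldl (fun inc k => inc.modify k [] (fun l => PySem.List.sorted l (fun v => v) false)) incoming
  -- states = []; for node in sorted(adj.keys()): states.extend([(node, prev) for prev in incoming[node]])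
  (PySem.List.sorted d.keys (fun k => k) false).foldl
    (fun states node => states ++ (incoming2.getD node []).map (fun prev => (node, prev))) []

-- ===== PORT B =====
def create_states_alt (adj : List (Int × List (Int × Int))) : List (Int × Int) :=
  let d := PySem.Dict.ofList adj
  -- pairs = [(edge[0], node) for node in adj for edge in adj[node] if edge[0] in adj]
  let pairs := d.items.flatMap (fun p => (p.2.filter (fun e => d.contains e.1)).map (fun e => (e.1, p.1)))
  -- return sorted(pairs)   (Python sorts tuples lexicographically)
  PySem.List.sorted2 pairs (fun q => q.1) (fun q => q.2) false

-- ===== PRECONDITION & SPEC =====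
def Spec_create_states (adj : List (Int × List (Int × Int))) (out : List (Int × Int)) : Prop := out = create_states_alt adj
instance (adj : List (Int × List (Int × Int))) (out : List (Int × Int)) : Decidable (Spec_create_states adj out) := by unfold Spec_create_states; infer_instance

-- ===== CLAIM (what is proved, stated in full; the proofs are below) =====
def Claim_equal_create_states : Prop := ∀ (adj : List (Int × List (Int × Int))), Dom_create_states adj → Spec_create_states adj (create_states adj)

-- ===== LEMMAS AND PROOFS =====

-- Python's lexicographic ≤ on int pairs
def pvLexLE (a b : Int × Int) : Prop := a.1 < b.1 ∨ (a.1 = b.1 ∧ a.2 ≤ b.2)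

theorem pvLexLE_antisymm {a b : Int × Int} (h1 : pvLexLE a b) (h2 : pvLexLE b a) : a = b := by
  obtain ⟨x, y⟩ := a; obtain ⟨u, v⟩ := b
  simp only [pvLexLE] at h1 h2
  simp only [Prod.mk.injEq]
  omega

theorem pvLexLE_trans {a b c : Int × Int} (h1 : pvLexLE a b) (h2 : pvLexLE b c) : pvLexLE a c := by
  obtain ⟨x, y⟩ := a; obtain ⟨u, v⟩ := b; obtain ⟨s, t⟩ := c
  simp only [pvLexLE] at *
  omega

-- insertBy with Python's tuple-lex "before" preserves Pairwise pvLexLE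
theorem insertBy_pairwise_lex (x : Int × Int) (ys : List (Int × Int))
    (h : ys.Pairwise pvLexLE) :
    (PySem.List.insertBy
      (fun a b => decide (a.1 < b.1) || (!decide (b.1 < a.1) && decide (a.2 < b.2))) x ys).Pairwise pvLexLE := by
  induction ys with
  | nil => simp [PySem.List.insertBy]
  | cons y ys ih =>
    rw [List.pairwise_cons] at h
    by_cases hb : (decide (x.1 < y.1) || (!decide (y.1 < x.1) && decide (x.2 < y.2))) = true
    · have hxy : pvLexLE x y := by
        simp only [Bool.or_eq_true, Bool.and_eq_true, Bool.not_eq_true', decide_eq_true_eq,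
          decide_eq_false_iff_not] at hb
        simp only [pvLexLE]; omega
      simp only [PySem.List.insertBy, hb, if_true]
      refine List.pairwise_cons.2 ⟨?_, List.pairwise_cons.2 ⟨h.1, h.2⟩⟩
      intro z hz
      rcases List.mem_cons.1 hz with rfl | hz
      · exact hxy
      · exact pvLexLE_trans hxy (h.1 z hz)
    · have hyx : pvLexLE y x := by
        simp only [Bool.or_eq_true, Bool.and_eq_true, Bool.not_eq_true', decide_eq_true_eq,
          decide_eq_false_iff_not] at hb
        simp only [pvLexLE]; omega
      simp only [PySem.List.insertBy, hb]
      refine List.pairwise_cons.2 ⟨?_, ih h.2⟩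
      intro z hz
      rcases (PySem.List.mem_insertBy _ x z ys).1 hz with rfl | hz
      · exact hyx
      · exact h.1 z hz

-- sorted2 by (fst, snd) is Pairwise pvLexLE
theorem sorted2_pairwise_lex (xs : List (Int × Int)) :
    (PySem.List.sorted2 xs (fun q => q.1) (fun q => q.2) false).Pairwise pvLexLE := by
  show (xs.foldl (fun acc x => PySem.List.insertBy _ x acc) []).Pairwise pvLexLE
  have : ∀ (l : List (Int × Int)) (acc : List (Int × Int)), acc.Pairwise pvLexLE →
      (l.foldl (fun acc x => PySem.List.insertBy
        (fun a b => decide (a.1 < b.1) || (!decide (b.1 < a.1) && decide (a.2 < b.2))) x acc) acc.reverse.reverse).Pairwise pvLexLE := by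
    intro l
    induction l with
    | nil => intro acc h; simpa using h
    | cons p l ih => intro acc h; simpa using ih _ (insertBy_pairwise_lex p acc h)
  simpa using this xs [] (by simp)

-- a key-bucketed flatMap with strictly increasing keys and sorted buckets is Pairwise pvLexLE
theorem flatMap_buckets_pairwise_lex (ks : List Int) (g : Int → List Int)
    (hk : ks.Pairwise (· < ·)) (hg : ∀ u, (g u).Pairwise (· ≤ ·)) :
    (ks.flatMap (fun u => (g u).map (fun v => (u, v)))).Pairwise pvLexLE := by
  induction ks with
  | nil => simp
  | cons u ks ih =>
    rw [List.pairwise_cons] at hk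
    rw [List.flatMap_cons, List.pairwise_append]
    refine ⟨?_, ih hk.2, ?_⟩
    · exact (List.pairwise_map).2 ((hg u).imp (fun h => Or.inr ⟨rfl, h⟩))
    · intro a ha b hb
      obtain ⟨v, _, rfl⟩ := List.mem_map.1 ha
      obtain ⟨u', hu', hb'⟩ := List.mem_flatMap.1 hb
      obtain ⟨v', _, rfl⟩ := List.mem_map.1 hb'
      exact Or.inl (hk.1 u' hu')

-- disjoint-filter split: filtering by (q ∈ u::K) is a permutation of filter (= u) ++ filter (∈ K) when u ∉ K
theorem filter_mem_cons_perm (P : List (Int × Int)) (u : Int) (K : List Int) (hu : u ∉ K) :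
    (P.filter (fun q => decide (q.1 ∈ u :: K))).Perm
      ((P.filter (fun q => q.1 == u)) ++ (P.filter (fun q => decide (q.1 ∈ K)))) := by
  induction P with
  | nil => simp
  | cons x P ih =>
    simp only [List.filter_cons]
    by_cases h1 : x.1 = u
    · have h2 : x.1 ∉ K := h1 ▸ hu
      rw [if_pos (by simp [h1]), if_pos (by simp [h1]), if_neg (by simp [h2])]
      simpa using ih.cons x
    · by_cases h2 : x.1 ∈ K
      · rw [if_pos (by simp [h2]), if_neg (by simp [h1]), if_pos (by simp [h2])]
        exact (ih.cons x).trans (List.perm_middle.symm)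
      · rw [if_neg (by simp [h1, h2]), if_neg (by simp [h1]), if_neg (by simp [h2])]
        exact ih

-- bucketing a pair list by its (nodup) keys is a permutation of filtering to those keys
theorem flatMap_filter_perm (K : List Int) (P : List (Int × Int)) (hK : K.Nodup) :
    (K.flatMap (fun u => P.filter (fun q => q.1 == u))).Perm
      (P.filter (fun q => decide (q.1 ∈ K))) := by
  induction K with
  | nil => simp
  | cons u K ih =>
    rw [List.nodup_cons] at hK
    rw [List.flatMap_cons]
    exact ((ih hK.2).append_left _).trans (filter_mem_cons_perm P u K hK.1).symm

-- the incoming dict after A's double loop, read at any key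
theorem incoming_getD (items : List (Int × List (Int × Int))) (inc0 : PySem.Dict Int (List Int)) (u : Int) :
    (items.foldl (fun inc p =>
      p.2.foldl (fun inc2 e => inc2.modify e.1 [] (fun l => l ++ [p.1])) inc) inc0).getD u []
    = inc0.getD u []
      ++ ((items.flatMap (fun p => p.2.map (fun e => (e.1, p.1)))).filter (fun q => q.1 == u)).map (fun q => q.2) := by
  induction items generalizing inc0 with
  | nil => simp
  | cons p items ih =>
    rw [List.foldl_cons, ih]
    have : p.2.foldl (fun inc2 e => inc2.modify e.1 [] (fun l => l ++ [p.1])) inc0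
        = (p.2.map (fun e => (e.1, p.1))).foldl (fun inc2 q => inc2.modify q.1 [] (fun l => l ++ [q.2])) inc0 := by
      rw [List.foldl_map]
    rw [this, PySem.Dict.getD_foldl_modify_append]
    simp [List.filter_append, List.map_append]

-- A's in-place per-bucket sort, read at any key (sorted is idempotent, so no Nodup is needed)
theorem sort_pass_getD (ks : List Int) (inc : PySem.Dict Int (List Int)) (u : Int) :
    (ks.foldl (fun inc k => inc.modify k [] (fun l => PySem.List.sorted l (fun v => v) false)) inc).getD u []
    = if u ∈ ks then PySem.List.sorted (inc.getD u []) (fun v => v) false else inc.getD u [] := by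
  induction ks generalizing inc with
  | nil => simp
  | cons k ks ih =>
    rw [List.foldl_cons, ih]
    by_cases hm : u ∈ ks
    · simp only [hm, if_true, List.mem_cons, or_true]
      by_cases hk : u = k
      · subst hk
        rw [PySem.Dict.getD_modify_self, PySem.List.sorted_sorted]
      · rw [PySem.Dict.getD_modify_of_ne _ _ _ hk]
    · simp only [hm, if_false]
      by_cases hk : u = k
      · subst hk
        simp only [List.mem_cons, true_or, if_true]
        rw [PySem.Dict.getD_modify_self]
      · simp only [List.mem_cons, hk, hm, or_self, if_false]
        rw [PySem.Dict.getD_modify_of_ne _ _ _ hk]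

theorem create_states_eq_alt (adj : List (Int × List (Int × Int))) :
    create_states adj = create_states_alt adj := by
  have hnd : (PySem.Dict.ofList adj).keys.Nodup := PySem.Dict.nodup_keys_ofList adj
  -- A's incoming₂ dict, read at any key, is the sorted source-bucket of that key
  have hbucket : ∀ u : Int,
      (((PySem.Dict.ofList adj).items.foldl (fun inc p =>
          p.2.foldl (fun inc2 e => inc2.modify e.1 [] (fun l => l ++ [p.1])) inc)
          PySem.Dict.empty).keys.foldl
        (fun inc k => inc.modify k [] (fun l => PySem.List.sorted l (fun v => v) false))
        ((PySem.Dict.ofList adj).items.foldl (fun inc p =>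
          p.2.foldl (fun inc2 e => inc2.modify e.1 [] (fun l => l ++ [p.1])) inc)
          PySem.Dict.empty)).getD u []
      = PySem.List.sorted
          ((((PySem.Dict.ofList adj).items.flatMap (fun p => p.2.map (fun e => (e.1, p.1)))).filter
            (fun q => q.1 == u)).map (fun q => q.2)) (fun v => v) false := by
    intro u
    rw [sort_pass_getD]
    have hincu : (((PySem.Dict.ofList adj).items.foldl (fun inc p =>
          p.2.foldl (fun inc2 e => inc2.modify e.1 [] (fun l => l ++ [p.1])) inc)
          PySem.Dict.empty)).getD u []
        = (((PySem.Dict.ofList adj).items.flatMap (fun p => p.2.map (fun e => (e.1, p.1)))).filter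
            (fun q => q.1 == u)).map (fun q => q.2) := by
      rw [incoming_getD, PySem.Dict.getD_empty, List.nil_append]
    by_cases hm : u ∈ (((PySem.Dict.ofList adj).items.foldl (fun inc p =>
          p.2.foldl (fun inc2 e => inc2.modify e.1 [] (fun l => l ++ [p.1])) inc)
          PySem.Dict.empty)).keys
    · rw [if_pos hm, hincu]
    · rw [if_neg hm]
      have hc : (((PySem.Dict.ofList adj).items.foldl (fun inc p =>
            p.2.foldl (fun inc2 e => inc2.modify e.1 [] (fun l => l ++ [p.1])) inc)
            PySem.Dict.empty)).contains u = false := by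
        exact Bool.eq_false_iff.2 (fun h => hm ((PySem.Dict.contains_iff_mem_keys _ _).1 h))
      have h0 : (((PySem.Dict.ofList adj).items.foldl (fun inc p =>
            p.2.foldl (fun inc2 e => inc2.modify e.1 [] (fun l => l ++ [p.1])) inc)
            PySem.Dict.empty)).getD u [] = ([] : List Int) :=
        PySem.Dict.getD_of_not_contains _ _ hc
      rw [h0] at hincu ⊢
      rw [← hincu]
      rfl
  -- A unrolled to a flatMap over the sorted keys of sorted buckets
  have hA : create_states adj =
      (PySem.List.sorted (PySem.Dict.ofList adj).keys (fun k => k) false).flatMap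
        (fun u => (PySem.List.sorted
          ((((PySem.Dict.ofList adj).items.flatMap (fun p => p.2.map (fun e => (e.1, p.1)))).filter
            (fun q => q.1 == u)).map (fun q => q.2)) (fun v => v) false).map (fun v => (u, v))) := by
    rw [show create_states adj = (PySem.List.sorted (PySem.Dict.ofList adj).keys (fun k => k) false).flatMap
        (fun node => ((((PySem.Dict.ofList adj).items.foldl (fun inc p =>
            p.2.foldl (fun inc2 e => inc2.modify e.1 [] (fun l => l ++ [p.1])) inc)
            PySem.Dict.empty).keys.foldl
          (fun inc k => inc.modify k [] (fun l => PySem.List.sorted l (fun v => v) false))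
          ((PySem.Dict.ofList adj).items.foldl (fun inc p =>
            p.2.foldl (fun inc2 e => inc2.modify e.1 [] (fun l => l ++ [p.1])) inc)
            PySem.Dict.empty)).getD node []).map (fun prev => (node, prev)))
      from (PySem.List.foldl_append_eq_flatMap _ _ []).trans (List.nil_append _)]
    exact List.flatMap_congr (fun u _ => by rw [hbucket u])
  -- B's flat pair list is the filtered flat edge list
  have hB : create_states_alt adj =
      PySem.List.sorted2
        (((PySem.Dict.ofList adj).items.flatMap (fun p => p.2.map (fun e => (e.1, p.1)))).filter
          (fun q => decide (q.1 ∈ (PySem.Dict.ofList adj).keys)))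
        (fun q => q.1) (fun q => q.2) false := by
    show PySem.List.sorted2 ((PySem.Dict.ofList adj).items.flatMap
        (fun p => (p.2.filter (fun e => (PySem.Dict.ofList adj).contains e.1)).map (fun e => (e.1, p.1))))
        (fun q => q.1) (fun q => q.2) false = _
    congr 1
    rw [List.filter_flatMap]
    refine List.flatMap_congr (fun p _ => ?_)
    rw [List.filter_map]
    simp only [PySem.Dict.contains_eq_decide_mem_keys]
    rfl
  rw [hA, hB]
  -- both sides are pairwise-lex-sorted permutations of the same multiset of pairs
  refine List.Perm.eq_of_pairwise (le := pvLexLE) (fun a b _ _ h1 h2 => pvLexLE_antisymm h1 h2) ?_ ?_ ?_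
  · refine flatMap_buckets_pairwise_lex _ _ ?_ (fun u => PySem.List.sorted_pairwise _ _)
    have h2 : (PySem.List.sorted (PySem.Dict.ofList adj).keys (fun k => k) false).Nodup :=
      ((PySem.List.sorted_perm _ _ _).nodup_iff).2 hnd
    exact ((PySem.List.sorted_pairwise (PySem.Dict.ofList adj).keys (fun k => k)).and h2).imp
      (fun h => lt_of_le_of_ne h.1 h.2)
  · exact sorted2_pairwise_lex _
  · refine List.Perm.trans ?_ (PySem.List.sorted2_perm _ _ _ _).symm
    refine List.Perm.trans
      (List.Perm.flatMap (l₂ := PySem.List.sorted (PySem.Dict.ofList adj).keys (fun k => k) false)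
        (g := fun u => ((PySem.Dict.ofList adj).items.flatMap (fun p => p.2.map (fun e => (e.1, p.1)))).filter
          (fun q => q.1 == u))
        (List.Perm.refl _) (fun u _ => ?_)) ?_
    · -- per-bucket: sorted bucket re-paired with its key ~ the filtered pair list
      refine List.Perm.trans (((PySem.List.sorted_perm _ _ _).map (fun v => (u, v)))) ?_
      rw [List.map_map]
      rw [List.map_congr_left (g := id) (fun q hq => ?_), List.map_id]
      have := List.of_mem_filter hq
      have hq1 : q.1 = u := by simpa using this
      simp [Function.comp, ← hq1]
    · exact List.Perm.trans
        (List.Perm.flatMap (PySem.List.sorted_perm _ _ _) (fun u _ => List.Perm.refl _))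
        (flatMap_filter_perm _ _ hnd)

-- ===== VERDICT (by name: the statement is the Claim_ definition above) =====
theorem create_states_spec : Claim_equal_create_states := by
  intro adj _
  show create_states adj = create_states_alt adj
  exact create_states_eq_alt adj
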